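-- pv_equiv track=rewrite | github.com/huyvan47/Tro_ly_Vat_tu_BMCVN_online | search-engine/rag/tag_filter.py | reorder_any_by_priority
-- ===== SOURCE A (Python) =====
-- from typing import Dict, List, Tuple, Set, Any, Union, Optional
--
-- def reorder_any_by_priority(anyt: List[str], priority_prefixes=("mechanisms:", "formula:")) -> List[str]:
--     """
--     Đưa các tag có prefix ưu tiên lên đầu (giữ thứ tự tương đối).
--     Mặc định: mechanisms:* trước, rồi formula:*, rồi các tag khác.
--     """
--     hi = []
--     lo = []
--     for t in anyt:
--         if any(str(t).startswith(p) for p in priority_prefixes):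
--             hi.append(t)
--         else:
--             lo.append(t)
--     return hi + lo
-- ===== SOURCE B (Python) =====
-- def reorder_any_by_priority(anyt, priority_prefixes=("mechanisms:", "formula:")):
--     # Stable sort on a binary key: 0 for priority-prefixed tags, 1 otherwise.
--     return sorted(anyt, key=lambda t: 0 if any(str(t).startswith(p) for p in priority_prefixes) else 1)
-- ===== Notes on version B (the rewrite author's own statement) =====
-- stated objective: idiomatic
-- what changed: Replaces the explicit two-accumulator partition loop with a single stable sorted() call keyed by a binary priority flag (0 = matches a prefix, 1 = otherwise), relying on sort stability to preserve relative order.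
import Mathlib
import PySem

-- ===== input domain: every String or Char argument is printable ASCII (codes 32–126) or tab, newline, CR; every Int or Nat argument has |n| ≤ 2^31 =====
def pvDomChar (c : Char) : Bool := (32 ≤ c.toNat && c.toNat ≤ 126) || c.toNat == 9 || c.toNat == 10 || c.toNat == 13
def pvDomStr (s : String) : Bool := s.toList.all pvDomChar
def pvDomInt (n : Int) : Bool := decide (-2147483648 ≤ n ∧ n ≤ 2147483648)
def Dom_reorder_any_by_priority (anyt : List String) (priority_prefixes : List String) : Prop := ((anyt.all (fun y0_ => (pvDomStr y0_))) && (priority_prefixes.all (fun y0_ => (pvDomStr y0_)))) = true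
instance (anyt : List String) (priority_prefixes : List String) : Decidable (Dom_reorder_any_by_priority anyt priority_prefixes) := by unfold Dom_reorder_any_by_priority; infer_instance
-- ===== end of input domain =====

-- B replaces A's explicit two-accumulator partition loop by one stable sort on a binary
-- priority key (idiomatic; same return value, no speed claim).


-- ===== PORT A =====
-- for t in anyt: append t to hi if any prefix matches, else to lo; return hi + lo
def reorder_any_by_priority (anyt : List String) (priority_prefixes : List String) : List String :=
  let st := anyt.foldl
    (fun (s : List String × List String) t =>
      if priority_prefixes.any (fun p => PySem.Str.startswith t p) then (s.1 ++ [t], s.2)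
      else (s.1, s.2 ++ [t]))
    ([], [])
  st.1 ++ st.2

-- ===== PORT B =====
-- key(t) = 0 if any prefix matches else 1
def pvKey_reorder (priority_prefixes : List String) (t : String) : Int :=
  if priority_prefixes.any (fun p => PySem.Str.startswith t p) then 0 else 1

-- sorted(anyt, key=key) — stable sort
def reorder_any_by_priority_alt (anyt : List String) (priority_prefixes : List String) : List String :=
  PySem.List.sorted anyt (pvKey_reorder priority_prefixes)

-- ===== PRECONDITION & SPEC =====
def Spec_reorder_any_by_priority (anyt : List String) (priority_prefixes : List String) (out : List String) : Prop := out = reorder_any_by_priority_alt anyt priority_prefixes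
instance (anyt : List String) (priority_prefixes : List String) (out : List String) : Decidable (Spec_reorder_any_by_priority anyt priority_prefixes out) := by unfold Spec_reorder_any_by_priority; infer_instance

-- ===== CLAIM (what is proved, stated in full; the proofs are below) =====
def Claim_equal_reorder_any_by_priority : Prop := ∀ (anyt : List String) (priority_prefixes : List String), Dom_reorder_any_by_priority anyt priority_prefixes → Spec_reorder_any_by_priority anyt priority_prefixes (reorder_any_by_priority anyt priority_prefixes)

-- ===== LEMMAS AND PROOFS =====

-- Inserting an element whose binary key is 0 between an all-0 block and an all-1 block
-- lands at the end of the 0-block.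
theorem pv_insert0 {α : Type} (p : α → Bool) (x : α) (hx : p x = true) :
    ∀ (hi lo : List α), (∀ a ∈ hi, p a = true) → (∀ b ∈ lo, p b = false) →
    PySem.List.insertBy
      (fun a b => decide ((if p a then (0:Int) else 1) < (if p b then (0:Int) else 1)))
      x (hi ++ lo) = hi ++ x :: lo := by
  intro hi
  induction hi with
  | nil =>
    intro lo _ hlo
    cases lo with
    | nil => simp [PySem.List.insertBy]
    | cons y ys =>
      have hy := hlo y (by simp)
      simp [PySem.List.insertBy, hx, hy]
  | cons y ys ih =>
    intro lo hhi hlo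
    have hy := hhi y (by simp)
    simp [PySem.List.insertBy, hx, hy]
    exact ih lo (fun a ha => hhi a (by simp [ha])) hlo

-- Inserting an element whose binary key is 1 lands at the very end.
theorem pv_insert1 {α : Type} (p : α → Bool) (x : α) (hx : p x = false) :
    ∀ (hi lo : List α), (∀ a ∈ hi, p a = true) → (∀ b ∈ lo, p b = false) →
    PySem.List.insertBy
      (fun a b => decide ((if p a then (0:Int) else 1) < (if p b then (0:Int) else 1)))
      x (hi ++ lo) = hi ++ (lo ++ [x]) := by
  intro hi lo hhi hlo
  rw [PySem.List.insertBy_of_forall_not_before]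
  · simp
  · intro y hy
    rcases List.mem_append.mp hy with h | h
    · simp [hx, hhi y h]
    · simp [hx, hlo y h]

-- The insertion-sort foldl with a binary key keeps the accumulator partitioned:
-- starting from hi ++ lo it ends at (hi ++ matches) ++ (lo ++ non-matches).
theorem pv_foldl_ins {α : Type} (p : α → Bool) :
    ∀ (xs hi lo : List α), (∀ a ∈ hi, p a = true) → (∀ b ∈ lo, p b = false) →
    xs.foldl (fun acc x =>
        PySem.List.insertBy
          (fun a b => decide ((if p a then (0:Int) else 1) < (if p b then (0:Int) else 1)))
          x acc) (hi ++ lo)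
      = (hi ++ xs.filter p) ++ (lo ++ xs.filter (fun x => ¬ p x)) := by
  intro xs
  induction xs with
  | nil => intro hi lo _ _; simp
  | cons x xs ih =>
    intro hi lo hhi hlo
    by_cases hx : p x = true
    · simp only [List.foldl_cons, pv_insert0 p x hx hi lo hhi hlo]
      have : hi ++ x :: lo = (hi ++ [x]) ++ lo := by simp
      rw [this, ih (hi ++ [x]) lo
        (fun a ha => by rcases List.mem_append.mp ha with h | h
                        · exact hhi a h
                        · simp at h; simp [h, hx]) hlo]
      simp [hx]
    · have hx' : p x = false := by simpa using hx
      simp only [List.foldl_cons, pv_insert1 p x hx' hi lo hhi hlo]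
      rw [ih hi (lo ++ [x]) hhi
        (fun b hb => by rcases List.mem_append.mp hb with h | h
                        · exact hlo b h
                        · simp at h; simp [h, hx'])]
      simp [hx']

-- A's partition loop computes (hi ++ matches, lo ++ non-matches).
theorem pv_foldl_partition {α : Type} (p : α → Bool) :
    ∀ (xs hi lo : List α),
    xs.foldl (fun (s : List α × List α) t =>
        if p t then (s.1 ++ [t], s.2) else (s.1, s.2 ++ [t])) (hi, lo)
      = (hi ++ xs.filter p, lo ++ xs.filter (fun x => ¬ p x)) := by
  intro xs
  induction xs with
  | nil => intro hi lo; simp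
  | cons x xs ih =>
    intro hi lo
    by_cases hx : p x = true
    · simp [List.foldl_cons, hx, ih (hi ++ [x]) lo]
    · have hx' : p x = false := by simpa using hx
      simp [List.foldl_cons, hx', ih hi (lo ++ [x])]

theorem pv_key_eq (priority_prefixes : List String) :
    pvKey_reorder priority_prefixes
      = fun t => if priority_prefixes.any (fun p => PySem.Str.startswith t p) then (0:Int) else 1 := rfl

-- ===== VERDICT (by name: the statement is the Claim_ definition above) =====
theorem reorder_any_by_priority_spec : Claim_equal_reorder_any_by_priority := by
  intro anyt priority_prefixes _
  unfold Spec_reorder_any_by_priority reorder_any_by_priority reorder_any_by_priority_alt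
  set p : String → Bool := fun t => priority_prefixes.any (fun q => PySem.Str.startswith t q) with hp
  rw [PySem.List.sorted_eq_foldl_insertBy, pv_key_eq]
  have hA := pv_foldl_partition p anyt [] []
  have hB := pv_foldl_ins p anyt [] [] (by simp) (by simp)
  simp only [List.nil_append] at hA hB
  simp only [hp] at hA hB ⊢
  rw [hA, hB]
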